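-- pv_equiv track=rewrite | github.com/kimheeseo/python | 백준/Bronze/29823. Pakirobot Manhattanis/Pakirobot Manhattanis.py | min_steps_to_warehouse
-- ===== SOURCE A (Python) =====
-- def min_steps_to_warehouse(steps):
--     x, y = 0, 0
--     for step in steps:
--         if step == 'N':
--             y += 1
--         elif step == 'S':
--             y -= 1
--         elif step == 'E':
--             x += 1
--         elif step == 'W':
--             x -= 1
--
--     return abs(x) + abs(y)
-- ===== SOURCE B (Python) =====
-- _VEC = {'N': (0, 1), 'S': (0, -1), 'E': (1, 0), 'W': (-1, 0)}
--
-- def min_steps_to_warehouse(steps):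
--     def disp(lo, hi):
--         # net displacement vector of steps[lo:hi], by divide and conquer
--         if hi - lo == 0:
--             return (0, 0)
--         if hi - lo == 1:
--             return _VEC.get(steps[lo], (0, 0))
--         mid = (lo + hi) // 2
--         ax, ay = disp(lo, mid)
--         bx, by = disp(mid, hi)
--         return (ax + bx, ay + by)
--     x, y = disp(0, len(steps))
--     return abs(x) + abs(y)
-- ===== Notes on version B (the rewrite author's own statement) =====
-- stated objective: alternative
-- what changed: Replaces A's single left-to-right pass updating running coordinates with a divide-and-conquer recursion: the net displacement vector of a segment is the component-wise sum of the displacements of its two halves, with single characters mapped through a direction-vector table.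
import Mathlib
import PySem

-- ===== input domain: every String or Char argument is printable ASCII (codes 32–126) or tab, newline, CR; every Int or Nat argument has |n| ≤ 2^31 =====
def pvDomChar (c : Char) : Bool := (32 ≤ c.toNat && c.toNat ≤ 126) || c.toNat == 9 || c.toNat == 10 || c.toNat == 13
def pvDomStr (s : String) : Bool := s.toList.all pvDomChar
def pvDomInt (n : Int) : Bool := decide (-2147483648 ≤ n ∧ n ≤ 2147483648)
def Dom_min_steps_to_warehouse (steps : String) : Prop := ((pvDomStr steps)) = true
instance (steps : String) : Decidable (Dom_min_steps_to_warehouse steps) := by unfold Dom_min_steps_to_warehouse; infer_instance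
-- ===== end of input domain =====

-- B replaces A's single left-to-right pass on running coordinates with a
-- divide-and-conquer recursion summing the displacement vectors of the two halves (alternative).

-- ===== PORT A =====
-- literal port of A: fold over the step characters updating (x, y) by the branch ladder
def min_steps_to_warehouse (steps : String) : Int :=
  let st := steps.toList.foldl
    (fun (p : Int × Int) step =>
      if step = 'N' then (p.1, p.2 + 1)
      else if step = 'S' then (p.1, p.2 - 1)
      else if step = 'E' then (p.1 + 1, p.2)
      else if step = 'W' then (p.1 - 1, p.2)
      else p)
    (0, 0)
  |st.1| + |st.2|

-- ===== PORT B =====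
-- _VEC.get(c, (0, 0)): the direction-vector table lookup
def pvVec (c : Char) : Int × Int :=
  PySem.Dict.getD
    (PySem.Dict.ofList [('N', ((0 : Int), (1 : Int))), ('S', (0, -1)), ('E', (1, 0)), ('W', (-1, 0))])
    c (0, 0)

-- disp(lo, hi): net displacement of the segment, by divide and conquer.
-- The Python recursion is on the index range steps[lo:hi]; here the segment is the list itself.
def pvDisp : List Char → Int × Int
  | [] => (0, 0)
  | [c] => pvVec c
  | c1 :: c2 :: rest =>
      let cs := c1 :: c2 :: rest
      let mid := cs.length / 2
      let a := pvDisp (cs.take mid)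
      let b := pvDisp (cs.drop mid)
      (a.1 + b.1, a.2 + b.2)
termination_by cs => cs.length
decreasing_by
  · simp only [cs, List.length_take, List.length_cons]; omega
  · simp only [cs, List.length_drop, List.length_cons]; omega

def min_steps_to_warehouse_alt (steps : String) : Int :=
  let d := pvDisp steps.toList
  |d.1| + |d.2|

-- ===== PRECONDITION & SPEC =====
def Spec_min_steps_to_warehouse (steps : String) (out : Int) : Prop := out = min_steps_to_warehouse_alt steps
instance (steps : String) (out : Int) : Decidable (Spec_min_steps_to_warehouse steps out) := by unfold Spec_min_steps_to_warehouse; infer_instance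

-- ===== CLAIM (what is proved, stated in full; the proofs are below) =====
def Claim_equal_min_steps_to_warehouse : Prop := ∀ (steps : String), Dom_min_steps_to_warehouse steps → Spec_min_steps_to_warehouse steps (min_steps_to_warehouse steps)

-- ===== LEMMAS AND PROOFS =====

def pvStepFn : Int × Int → Char → Int × Int :=
  fun p step =>
    if step = 'N' then (p.1, p.2 + 1)
    else if step = 'S' then (p.1, p.2 - 1)
    else if step = 'E' then (p.1 + 1, p.2)
    else if step = 'W' then (p.1 - 1, p.2)
    else p

theorem pv_fold_counts (cs : List Char) (x y : Int) :
    cs.foldl pvStepFn (x, y)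
      = (x + cs.count 'E' - cs.count 'W', y + cs.count 'N' - cs.count 'S') := by
  induction cs generalizing x y with
  | nil => simp
  | cons c cs ih =>
    simp only [List.foldl_cons, pvStepFn]
    by_cases hN : c = 'N' <;> by_cases hS : c = 'S' <;> by_cases hE : c = 'E' <;>
      by_cases hW : c = 'W' <;>
      simp_all [List.count_cons, ih] <;> ring_nf <;> omega

theorem pvVec_eq (c : Char) : pvVec c =
    if c = 'N' then ((0 : Int), (1 : Int)) else if c = 'S' then (0, -1)
    else if c = 'E' then (1, 0) else if c = 'W' then (-1, 0) else (0, 0) := by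
  have h : PySem.Dict.ofList [('N', ((0 : Int), (1 : Int))), ('S', (0, -1)), ('E', (1, 0)), ('W', (-1, 0))]
      = PySem.Dict.mk [('N', ((0 : Int), (1 : Int))), ('S', (0, -1)), ('E', (1, 0)), ('W', (-1, 0))] := by decide
  simp only [pvVec, h, PySem.Dict.getD_eq_get?_getD, PySem.Dict.get?_mk_cons]
  by_cases hN : c = 'N' <;> by_cases hS : c = 'S' <;> by_cases hE : c = 'E' <;> by_cases hW : c = 'W' <;>
    simp_all [PySem.Dict.get?, @eq_comm Char]

theorem pv_disp_counts (cs : List Char) :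
    pvDisp cs = ((cs.count 'E' : Int) - cs.count 'W', (cs.count 'N' : Int) - cs.count 'S') := by
  induction cs using pvDisp.induct with
  | case1 => simp [pvDisp]
  | case2 c =>
    simp only [pvDisp, pvVec_eq]
    by_cases hN : c = 'N' <;> by_cases hS : c = 'S' <;> by_cases hE : c = 'E' <;>
      by_cases hW : c = 'W' <;>
      simp_all [List.count_cons, List.count_nil]
  | case3 a b rest cs0 mid0 ih1 ih2 =>
    simp only [pvDisp]
    have h : (a :: b :: rest).take ((a :: b :: rest).length / 2) ++
        (a :: b :: rest).drop ((a :: b :: rest).length / 2) = a :: b :: rest :=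
      List.take_append_drop _ _
    have hE := congrArg (List.count 'E') h
    have hW := congrArg (List.count 'W') h
    have hN := congrArg (List.count 'N') h
    have hS := congrArg (List.count 'S') h
    simp only [List.count_append] at hE hW hN hS
    rw [ih1, ih2]
    refine Prod.ext ?_ ?_ <;> push_cast [← hE, ← hW, ← hN, ← hS] <;> ring

-- ===== VERDICT (by name: the statement is the Claim_ definition above) =====
theorem min_steps_to_warehouse_spec : Claim_equal_min_steps_to_warehouse := by
  intro steps _
  unfold Spec_min_steps_to_warehouse min_steps_to_warehouse min_steps_to_warehouse_alt
  have h := pv_fold_counts steps.toList 0 0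
  simp only [show (fun (p : Int × Int) step =>
      if step = 'N' then (p.1, p.2 + 1)
      else if step = 'S' then (p.1, p.2 - 1)
      else if step = 'E' then (p.1 + 1, p.2)
      else if step = 'W' then (p.1 - 1, p.2)
      else p) = pvStepFn from rfl, h, pv_disp_counts]
  ring_nf
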